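-- pv_equiv track=rewrite | github.com/AthharPro/zypher | python-scanner/zypher_scanner/db_ruls/cicd-vuln-005.py | _find_stage_line
-- ===== SOURCE A (Python) =====
-- from typing import List, Dict, Any
--
-- def _find_stage_line(file_lines: List[str], stage_idx: int) -> int:
--     stage_marker_count = -1
--     for i, line in enumerate(file_lines):
--         if "stage:" in line or "- stage:" in line:
--             stage_marker_count += 1
--             if stage_marker_count == stage_idx:
--                 return i
--     return -1
-- ===== SOURCE B (Python) =====
-- def _find_stage_line(file_lines, stage_idx):
--     markers = [i for i, line in enumerate(file_lines) if "stage:" in line]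
--     if 0 <= stage_idx < len(markers):
--         return markers[stage_idx]
--     return -1
-- ===== Notes on version B (the rewrite author's own statement) =====
-- stated objective: simpler
-- what changed: Replaces the counting early-return scan (with its redundant '- stage:' check) by collecting all marker line indices once and indexing into that list with an explicit 0 <= stage_idx < len guard.
import Mathlib
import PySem

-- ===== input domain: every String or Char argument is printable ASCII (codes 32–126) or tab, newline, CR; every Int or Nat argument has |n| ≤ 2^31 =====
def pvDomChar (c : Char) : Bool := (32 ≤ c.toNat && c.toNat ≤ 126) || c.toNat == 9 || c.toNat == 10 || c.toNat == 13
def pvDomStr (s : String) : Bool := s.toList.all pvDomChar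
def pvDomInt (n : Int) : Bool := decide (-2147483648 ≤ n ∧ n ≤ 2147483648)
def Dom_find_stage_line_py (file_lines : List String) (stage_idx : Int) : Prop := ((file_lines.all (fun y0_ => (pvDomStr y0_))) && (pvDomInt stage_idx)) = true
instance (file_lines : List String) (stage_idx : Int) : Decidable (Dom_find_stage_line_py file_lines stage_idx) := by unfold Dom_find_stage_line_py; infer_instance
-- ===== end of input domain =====

-- B replaces A's counting early-return scan by collecting all marker line indices and indexing with a 0 ≤ stage_idx guard (simpler decomposition, same cost).


-- ===== PORT A =====
-- A's loop: counter state (stage_marker_count), early return when it hits stage_idx.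
def findStageGo (stage_idx : Int) : List String → Int → Int → Int
  | [], _, _ => -1
  | line :: rest, i, c =>
    if PySem.Str.isIn "stage:" line || PySem.Str.isIn "- stage:" line then
      if c + 1 = stage_idx then i else findStageGo stage_idx rest (i + 1) (c + 1)
    else findStageGo stage_idx rest (i + 1) c

def find_stage_line_py (file_lines : List String) (stage_idx : Int) : Int :=
  findStageGo stage_idx file_lines 0 (-1)

-- ===== PORT B =====
-- B: markers = [i for i, line in enumerate(file_lines) if "stage:" in line]; markers[stage_idx] if in range else -1.
def find_stage_line_py_alt (file_lines : List String) (stage_idx : Int) : Int :=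
  let markers := ((PySem.List.enumerate file_lines 0).filter
      (fun p => PySem.Str.isIn "stage:" p.2)).map (fun p => p.1)
  if 0 ≤ stage_idx ∧ stage_idx < markers.length then
    (PySem.List.pyGet? markers stage_idx).getD (-1)
  else -1

-- ===== PRECONDITION & SPEC =====
def Spec_find_stage_line_py (file_lines : List String) (stage_idx : Int) (out : Int) : Prop := out = find_stage_line_py_alt file_lines stage_idx
instance (file_lines : List String) (stage_idx : Int) (out : Int) : Decidable (Spec_find_stage_line_py file_lines stage_idx out) := by unfold Spec_find_stage_line_py; infer_instance

-- ===== CLAIM (what is proved, stated in full; the proofs are below) =====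
def Claim_equal_find_stage_line_py : Prop := ∀ (file_lines : List String) (stage_idx : Int), Dom_find_stage_line_py file_lines stage_idx → Spec_find_stage_line_py file_lines stage_idx (find_stage_line_py file_lines stage_idx)

-- ===== LEMMAS AND PROOFS =====

-- "- stage:" contains "stage:", so A's disjunction collapses to the first test.
theorem isIn_dash_imp (l : String) :
    PySem.Str.isIn "- stage:" l = true → PySem.Str.isIn "stage:" l = true := by
  intro h
  rw [PySem.Str.isIn_iff_infix] at h ⊢
  exact List.IsInfix.trans (by decide) h

theorem cond_collapse (l : String) :
    (PySem.Str.isIn "stage:" l || PySem.Str.isIn "- stage:" l)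
      = PySem.Str.isIn "stage:" l := by
  cases h : PySem.Str.isIn "stage:" l with
  | true => simp
  | false =>
    simp only [Bool.false_or]
    cases h2 : PySem.Str.isIn "- stage:" l with
    | false => rfl
    | true => exact absurd (isIn_dash_imp l h2) (by rw [h]; simp)

def markersFrom (fl : List String) (i : Int) : List Int :=
  ((PySem.List.enumerate fl i).filter (fun p => PySem.Str.isIn "stage:" p.2)).map (fun p => p.1)

theorem markersFrom_cons_pos (l : String) (rest : List String) (i : Int)
    (h : PySem.Str.isIn "stage:" l = true) :
    markersFrom (l :: rest) i = i :: markersFrom rest (i + 1) := by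
  simp only [markersFrom, PySem.List.enumerate_cons, List.filter_cons]
  rw [if_pos (by simpa using h)]
  rfl

theorem markersFrom_cons_neg (l : String) (rest : List String) (i : Int)
    (h : PySem.Str.isIn "stage:" l = false) :
    markersFrom (l :: rest) i = markersFrom rest (i + 1) := by
  simp only [markersFrom, PySem.List.enumerate_cons, List.filter_cons]
  rw [if_neg (by simpa using h)]

theorem go_eq (si : Int) :
    ∀ (fl : List String) (i c : Int),
      findStageGo si fl i c =
        (if 0 ≤ si - (c + 1) ∧ si - (c + 1) < (markersFrom fl i).length then
          (markersFrom fl i).getD (si - (c + 1)).toNat (-1)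
        else -1) := by
  intro fl
  induction fl with
  | nil =>
    intro i c
    simp [findStageGo, markersFrom, PySem.List.enumerate]
  | cons l rest ih =>
    intro i c
    rw [findStageGo, cond_collapse]
    cases h : PySem.Str.isIn "stage:" l with
    | false =>
      rw [markersFrom_cons_neg l rest i h, if_neg (by simp), ih]
    | true =>
      rw [markersFrom_cons_pos l rest i h, if_pos rfl]
      by_cases he : c + 1 = si
      · rw [if_pos he]
        have h0 : si - (c + 1) = 0 := by omega
        rw [h0, if_pos ⟨le_refl 0, by simp⟩]
        simp
      · rw [if_neg he, ih]
        by_cases hp : 0 ≤ si - (c + 1 + 1) ∧ si - (c + 1 + 1) < ((markersFrom rest (i + 1)).length : Int)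
        · rw [if_pos hp]
          have hp' : 0 ≤ si - (c + 1) ∧ si - (c + 1) < ((i :: markersFrom rest (i + 1)).length : Int) := by
            simp at hp ⊢; omega
          rw [if_pos hp']
          have hk : (si - (c + 1)).toNat = (si - (c + 1 + 1)).toNat + 1 := by omega
          rw [hk]
          rfl
        · rw [if_neg hp]
          have hn : ¬(0 ≤ si - (c + 1) ∧ si - (c + 1) < ((i :: markersFrom rest (i + 1)).length : Int)) := by
            simp only [List.length_cons]
            push_cast
            intro hcon
            exact hp ⟨by omega, by omega⟩
          rw [if_neg hn]

-- ===== VERDICT (by name: the statement is the Claim_ definition above) =====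
theorem find_stage_line_py_spec : Claim_equal_find_stage_line_py := by
  intro fl si _
  unfold Spec_find_stage_line_py find_stage_line_py find_stage_line_py_alt
  rw [go_eq]
  show _ = (if 0 ≤ si ∧ si < ((markersFrom fl 0).length : Int) then
      (PySem.List.pyGet? (markersFrom fl 0) si).getD (-1) else -1)
  have h0 : si - (-1 + 1) = si := by omega
  rw [h0]
  by_cases h : 0 ≤ si ∧ si < ((markersFrom fl 0).length : Int)
  · rw [if_pos h, if_pos h, PySem.List.pyGet?_of_nonneg _ h.1]
    rw [List.getD_eq_getElem?_getD]
  · rw [if_neg h, if_neg h]
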